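-- pv_equiv track=rewrite | github.com/nknavkal/projecto-patronum | solver.py | startingOrder
-- ===== SOURCE A (Python) =====
-- def startingOrder(inThird):
--     a = []
--     b = []
--     for key, value in sorted(iter(inThird.items()), key=lambda k_v1: (k_v1[1],k_v1[0])):
--         a.append(key)
--         temp = b
--         b = a
--         a = temp
--     b.reverse()
--     return a + b
-- ===== SOURCE B (Python) =====
-- def startingOrder(inThird):
--     keys = [k for k, v in sorted(inThird.items(), key=lambda kv: (kv[1], kv[0]))]
--     evens, odds = keys[0::2], keys[1::2]
--     if len(keys) % 2 == 0:
--         return evens + odds[::-1]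
--     return odds + evens[::-1]
-- ===== Notes on version B (the rewrite author's own statement) =====
-- stated objective: simpler
-- what changed: Replaces A's per-iteration two-list reference-swap append loop by sorting once, slicing the sorted key list into even-index and odd-index positions, and concatenating the two slices according to the parity of the length.
import Mathlib
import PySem

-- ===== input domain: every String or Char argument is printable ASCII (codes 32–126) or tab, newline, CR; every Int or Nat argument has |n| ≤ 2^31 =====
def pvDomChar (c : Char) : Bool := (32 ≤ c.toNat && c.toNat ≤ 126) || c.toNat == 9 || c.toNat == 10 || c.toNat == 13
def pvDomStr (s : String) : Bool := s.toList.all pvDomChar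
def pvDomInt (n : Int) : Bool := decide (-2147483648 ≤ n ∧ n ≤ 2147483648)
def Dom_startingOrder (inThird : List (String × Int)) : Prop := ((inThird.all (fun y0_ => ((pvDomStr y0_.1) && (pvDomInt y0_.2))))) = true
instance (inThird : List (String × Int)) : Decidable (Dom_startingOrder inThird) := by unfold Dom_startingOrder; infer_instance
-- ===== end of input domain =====

-- B replaces A's two-list reference-swap append loop by one sort, even/odd-index slices
-- of the key list, and a parity branch over the two slices (objective: simpler).


-- ===== PORT A =====
-- for key, value in sorted(inThird.items(), key=lambda kv: (kv[1], kv[0])):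
--   a.append(key); temp = b; b = a; a = temp        -- state (a, b) ↦ (b, a ++ [key])
def startingOrder (inThird : List (String × Int)) : List String :=
  let ab := (PySem.List.sorted2 inThird (fun kv => kv.2) (fun kv => kv.1)).foldl
    (fun (ab : List String × List String) kv => (ab.2, ab.1 ++ [kv.1])) ([], [])
  ab.1 ++ ab.2.reverse

-- ===== PORT B =====
-- hand port of the step-2 slice xs[0::2] (PySem has no stepped slice): exact — every
-- second element starting at index 0; xs[1::2] is then pvStep2 xs.tail.
def pvStep2 (xs : List String) : List String :=
  match xs with
  | [] => []
  | [x] => [x]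
  | x :: _ :: rest => x :: pvStep2 rest

def startingOrder_alt (inThird : List (String × Int)) : List String :=
  let keys := (PySem.List.sorted2 inThird (fun kv => kv.2) (fun kv => kv.1)).map Prod.fst
  let evens := pvStep2 keys        -- keys[0::2]
  let odds := pvStep2 keys.tail    -- keys[1::2]
  if keys.length % 2 = 0 then evens ++ odds.reverse else odds ++ evens.reverse

-- ===== PRECONDITION & SPEC =====
def Spec_startingOrder (inThird : List (String × Int)) (out : List String) : Prop := out = startingOrder_alt inThird
instance (inThird : List (String × Int)) (out : List String) : Decidable (Spec_startingOrder inThird out) := by unfold Spec_startingOrder; infer_instance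

-- ===== CLAIM (what is proved, stated in full; the proofs are below) =====
def Claim_equal_startingOrder : Prop := ∀ (inThird : List (String × Int)), Dom_startingOrder inThird → Spec_startingOrder inThird (startingOrder inThird)

-- ===== LEMMAS AND PROOFS =====

-- A's loop over any key list, with arbitrary accumulators, computes the even/odd split.
theorem loop_eq_step2 (ks a b : List String) :
    ks.foldl (fun (ab : List String × List String) k => (ab.2, ab.1 ++ [k])) (a, b) =
      if ks.length % 2 = 0 then (a ++ pvStep2 ks, b ++ pvStep2 ks.tail)
      else (b ++ pvStep2 ks.tail, a ++ pvStep2 ks) := by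
  induction ks using pvStep2.induct generalizing a b with
  | case1 => simp [pvStep2]
  | case2 x => simp [pvStep2, List.foldl]
  | case3 x y rest ih =>
    simp only [List.foldl]
    rw [ih]
    have hy : pvStep2 (y :: rest) = y :: pvStep2 rest.tail := by
      cases rest <;> rfl
    rcases Nat.even_or_odd rest.length with h | h
    · have h2 : rest.length % 2 = 0 := Nat.even_iff.mp h
      simp [h2, Nat.add_mod, pvStep2, hy]
    · have h2 : rest.length % 2 = 1 := Nat.odd_iff.mp h
      simp [h2, Nat.add_mod, pvStep2, hy]

-- ===== VERDICT (by name: the statement is the Claim_ definition above) =====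
theorem startingOrder_spec : Claim_equal_startingOrder := by
  intro inThird _
  show startingOrder inThird = startingOrder_alt inThird
  unfold startingOrder startingOrder_alt
  rw [← List.foldl_map (f := Prod.fst)
    (g := fun (ab : List String × List String) k => (ab.2, ab.1 ++ [k]))]
  rw [loop_eq_step2]
  simp only [List.length_map]
  split <;> simp
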